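-- pv_equiv track=rewrite | github.com/xie38388/hermes-agent | core/session_persistence.py | _get_messages_up_to_last_assistant
-- ===== SOURCE A (Python) =====
-- from typing import Any, Dict, List, Optional
--
-- def _get_messages_up_to_last_assistant(messages: List[Dict]) -> List[Dict]:
--     """
--     Get messages up to (but not including) the last assistant turn.
--
--     This is used when we need to "roll back" to the last successful point
--     in the conversation, typically when the final assistant message is
--     incomplete or malformed.
--
--     Args:
--         messages: Full message list
--
--     Returns:
--         Messages up to the last complete assistant turn (ending with user/tool message)
--     """
--     if not messages:
--         return []
--
--     # Find the index of the last assistant message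
--     last_assistant_idx = None
--     for i in range(len(messages) - 1, -1, -1):
--         if messages[i].get("role") == "assistant":
--             last_assistant_idx = i
--             break
--
--     if last_assistant_idx is None:
--         # No assistant message found, return all messages
--         return messages.copy()
--
--     # Return everything up to (not including) the last assistant message
--     return messages[:last_assistant_idx]
-- ===== SOURCE B (Python) =====
-- from typing import Any, Dict, List, Optional
--
-- def _get_messages_up_to_last_assistant(messages: List[Dict]) -> List[Dict]:
--     # Single streaming pass with an accumulator: each time an assistant message
--     # is reached, commit the pending buffer to `out` and restart the buffer at
--     # that assistant; at the end the uncommitted buffer (the last assistant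
--     # onward) is dropped.  If no assistant was ever seen, the buffer is the
--     # whole list (a fresh copy) and is returned.
--     out = []
--     buf = []
--     seen = False
--     for m in messages:
--         if m.get("role") == "assistant":
--             out.extend(buf)
--             buf = [m]
--             seen = True
--         else:
--             buf.append(m)
--     return out if seen else buf
-- ===== Notes on version B (the rewrite author's own statement) =====
-- stated objective: alternative
-- what changed: Replaces A's reverse index scan with break followed by a slice by a single forward streaming pass with a commit/buffer accumulator: the buffer is committed to the output at each assistant message, so no indices or slicing are used at all.
import Mathlib
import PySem

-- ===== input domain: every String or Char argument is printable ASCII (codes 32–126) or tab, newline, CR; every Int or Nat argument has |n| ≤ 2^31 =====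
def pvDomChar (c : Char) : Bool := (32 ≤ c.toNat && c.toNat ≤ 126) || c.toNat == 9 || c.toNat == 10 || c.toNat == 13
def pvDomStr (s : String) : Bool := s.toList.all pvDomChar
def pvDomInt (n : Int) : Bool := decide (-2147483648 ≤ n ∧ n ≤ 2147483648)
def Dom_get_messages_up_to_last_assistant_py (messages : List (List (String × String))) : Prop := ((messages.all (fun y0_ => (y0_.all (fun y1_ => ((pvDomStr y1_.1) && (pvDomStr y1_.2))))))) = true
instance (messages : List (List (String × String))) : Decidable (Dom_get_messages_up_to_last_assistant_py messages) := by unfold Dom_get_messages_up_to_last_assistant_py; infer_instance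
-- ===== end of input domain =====

-- B replaces A's reverse index scan + slice by a single forward streaming pass with a
-- commit/buffer accumulator (no indices, no slicing): an alternative decomposition, same cost.


-- ===== PORT A =====
-- m.get("role") == "assistant" for an association-list dict
def pvIsAssistant (m : List (String × String)) : Bool :=
  (PySem.Dict.mk m).get? "role" == some "assistant"

-- literal port of A: reverse range scan with break (find? = first hit), None ⇒ copy, else slice.
-- messages[i] inside the loop is always in range; pyGetD with default [] is exact there.
def get_messages_up_to_last_assistant_py (messages : List (List (String × String))) : List (List (String × String)) :=
  if messages = [] then []
  else
    match (PySem.List.pyRange ((messages.length : Int) - 1) (-1) (-1)).find?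
        (fun i => pvIsAssistant (PySem.List.pyGetD messages i [])) with
    | none => messages
    | some idx => PySem.List.slice messages none (some idx)

-- ===== PORT B =====
-- B's loop body: state (out, buf, seen); assistant ⇒ commit buf to out and restart buf at m.
def pvStep (s : List (List (String × String)) × List (List (String × String)) × Bool)
    (m : List (String × String)) : List (List (String × String)) × List (List (String × String)) × Bool :=
  if pvIsAssistant m then (s.1 ++ s.2.1, [m], true) else (s.1, s.2.1 ++ [m], s.2.2)

-- literal port of B: one forward fold over the messages, then `out if seen else buf`.
def get_messages_up_to_last_assistant_py_alt (messages : List (List (String × String))) : List (List (String × String)) :=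
  let s := messages.foldl pvStep ([], [], false)
  if s.2.2 then s.1 else s.2.1

-- ===== PRECONDITION & SPEC =====
def Spec_get_messages_up_to_last_assistant_py (messages : List (List (String × String))) (out : List (List (String × String))) : Prop := out = get_messages_up_to_last_assistant_py_alt messages
instance (messages : List (List (String × String))) (out : List (List (String × String))) : Decidable (Spec_get_messages_up_to_last_assistant_py messages out) := by unfold Spec_get_messages_up_to_last_assistant_py; infer_instance

-- ===== CLAIM (what is proved, stated in full; the proofs are below) =====
def Claim_equal_get_messages_up_to_last_assistant_py : Prop := ∀ (messages : List (List (String × String))), Dom_get_messages_up_to_last_assistant_py messages → Spec_get_messages_up_to_last_assistant_py messages (get_messages_up_to_last_assistant_py messages)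

-- ===== LEMMAS AND PROOFS =====

-- find? only looks at its predicate on members of the list
theorem pv_find?_congr {α : Type} {l : List α} {p q : α → Bool}
    (h : ∀ a ∈ l, p a = q a) : l.find? p = l.find? q := by
  induction l with
  | nil => rfl
  | cons x xs ih =>
    simp only [List.find?_cons, h x (by simp)]
    cases q x
    · exact ih (fun a ha => h a (by simp [ha]))
    · rfl

-- Invariant of B's fold, phrased against A's descending search over the same list.
theorem pv_fold_char (xs : List (List (String × String))) :
    (xs.foldl pvStep ([], [], false)).1 ++ (xs.foldl pvStep ([], [], false)).2.1 = xs ∧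
    (∀ (_h : (PySem.List.pyRange ((xs.length : Int) - 1) (-1) (-1)).find?
        (fun i => pvIsAssistant (PySem.List.pyGetD xs i [])) = none),
      (xs.foldl pvStep ([], [], false)).2.2 = false ∧ (xs.foldl pvStep ([], [], false)).1 = []) ∧
    (∀ idx, (PySem.List.pyRange ((xs.length : Int) - 1) (-1) (-1)).find?
        (fun i => pvIsAssistant (PySem.List.pyGetD xs i [])) = some idx →
      (xs.foldl pvStep ([], [], false)).2.2 = true ∧
      (xs.foldl pvStep ([], [], false)).1 = xs.take idx.toNat) := by
  induction xs using List.reverseRecOn with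
  | nil =>
    refine ⟨rfl, fun _ => ⟨rfl, rfl⟩, fun idx h => ?_⟩
    simp at h
  | append_singleton xs x ih =>
    obtain ⟨ih1, ihn, ihs⟩ := ih
    rw [List.foldl_append]
    have hlen : ((xs ++ [x]).length : Int) - 1 = (xs.length : Int) := by simp
    have hget : PySem.List.pyGetD (xs ++ [x]) (xs.length : Int) [] = x := by
      simp [PySem.List.pyGetD_natCast]
    have hcons := PySem.List.pyRange_neg_one_cons
      (a := (xs.length : Int)) (b := -1) (by omega)
    cases hx : pvIsAssistant x with
    | true =>
      have hfind : (PySem.List.pyRange (((xs ++ [x]).length : Int) - 1) (-1) (-1)).find?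
          (fun i => pvIsAssistant (PySem.List.pyGetD (xs ++ [x]) i [])) =
          some (xs.length : Int) := by
        rw [hlen, hcons, List.find?_cons]
        simp [hget, hx]
      refine ⟨?_, ?_, ?_⟩
      · simp [pvStep, hx, ih1]
      · intro h; rw [hfind] at h; exact absurd h (by simp)
      · intro idx h
        rw [hfind] at h
        obtain rfl : (xs.length : Int) = idx := by injection h
        constructor
        · simp [pvStep, hx]
        · simp [pvStep, hx, ih1, List.take_append_of_le_length (le_refl xs.length)]
    | false =>
      have hfind : (PySem.List.pyRange (((xs ++ [x]).length : Int) - 1) (-1) (-1)).find?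
          (fun i => pvIsAssistant (PySem.List.pyGetD (xs ++ [x]) i [])) =
          (PySem.List.pyRange ((xs.length : Int) - 1) (-1) (-1)).find?
          (fun i => pvIsAssistant (PySem.List.pyGetD xs i [])) := by
        rw [hlen, hcons, List.find?_cons]
        simp only [hget, hx]
        apply pv_find?_congr
        intro i hi
        have hmem : 0 ≤ i ∧ i < (xs.length : Int) := by
          rw [PySem.List.pyRange_neg_one_eq_reverse] at hi
          simp only [List.mem_reverse, PySem.List.mem_pyRange_one] at hi
          omega
        congr 1
        rw [PySem.List.pyGetD_eq_getElem _ _ hmem.1 (by simp; omega),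
            PySem.List.pyGetD_eq_getElem _ _ hmem.1 hmem.2]
        rw [List.getElem_append_left (by omega)]
      refine ⟨?_, ?_, ?_⟩
      · simp [pvStep, hx, ← List.append_assoc, ih1]
      · intro h
        rw [hfind] at h
        exact ⟨by simp [pvStep, hx, (ihn h).1], by simp [pvStep, hx, (ihn h).2]⟩
      · intro idx h
        rw [hfind] at h
        have hmem := List.mem_of_find?_eq_some h
        have hidx : 0 ≤ idx ∧ idx < (xs.length : Int) := by
          rw [PySem.List.pyRange_neg_one_eq_reverse] at hmem
          simp only [List.mem_reverse, PySem.List.mem_pyRange_one] at hmem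
          omega
        refine ⟨by simp [pvStep, hx, (ihs idx h).1], ?_⟩
        simp [pvStep, hx, (ihs idx h).2,
          List.take_append_of_le_length (by omega : idx.toNat ≤ xs.length)]

-- ===== VERDICT (by name: the statement is the Claim_ definition above) =====
theorem get_messages_up_to_last_assistant_py_spec : Claim_equal_get_messages_up_to_last_assistant_py := by
  intro messages _
  unfold Spec_get_messages_up_to_last_assistant_py
  unfold get_messages_up_to_last_assistant_py get_messages_up_to_last_assistant_py_alt
  obtain ⟨h1, hn, hs⟩ := pv_fold_char messages
  by_cases hnil : messages = []
  · subst hnil; simp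
  · rw [if_neg hnil]
    cases hfind : (PySem.List.pyRange ((messages.length : Int) - 1) (-1) (-1)).find?
        (fun i => pvIsAssistant (PySem.List.pyGetD messages i [])) with
    | none =>
      obtain ⟨hseen, hout⟩ := hn hfind
      rw [hout, List.nil_append] at h1
      simp only [hseen, Bool.false_eq_true, if_false]
      exact h1.symm
    | some idx =>
      obtain ⟨hseen, hout⟩ := hs idx hfind
      have hmem := List.mem_of_find?_eq_some hfind
      have hidx : 0 ≤ idx := by
        rw [PySem.List.pyRange_neg_one_eq_reverse] at hmem
        simp only [List.mem_reverse, PySem.List.mem_pyRange_one] at hmem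
        omega
      simp only [hseen, if_true]
      rw [PySem.List.slice_to _ hidx, hout]
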